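-- pv_equiv track=rewrite | github.com/taherdoust/ai4db | stage1_enhanced_generator_stratified.py | classify_usage_frequency
-- ===== SOURCE A (Python) =====
-- from typing import Dict, List, Optional
--
-- class SpatialSQLTaxonomy:
--     """
--     Comprehensive taxonomy based on state-of-the-art Text-to-SQL research
--     References:
--     - BIRD: Execution accuracy benchmark
--     - Spider: Cross-domain benchmark
--     - OmniSQL: Universal benchmarking with tone classification
--     - SpatialSQL (Gao et al. 2024): Spatial function usage analysis
--     """
--
--     # SQL Operation Types (adapted from BIRD/Spider for spatial SQL)
--     SQL_TYPES = {
--         "SIMPLE_SELECT": "Single table selection with optional WHERE",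
--         "SPATIAL_JOIN": "Join with spatial predicate (ST_Intersects, ST_Within, etc.)",
--         "AGGREGATION": "GROUP BY with aggregate functions (COUNT, SUM, AVG)",
--         "NESTED_QUERY": "Subquery or CTE (WITH clause)",
--         "SPATIAL_MEASUREMENT": "Measurement functions (ST_Area, ST_Distance, ST_Length)",
--         "SPATIAL_PROCESSING": "Geometry processing (ST_Buffer, ST_Union, ST_Intersection)",
--         "SPATIAL_CLUSTERING": "Spatial clustering (ST_ClusterDBSCAN, ST_ClusterKMeans)",
--         "RASTER_VECTOR": "Raster-vector integration (ST_Value, ST_SummaryStats)",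
--         "MULTI_JOIN": "Multiple table joins (3+ tables)",
--         "WINDOW_FUNCTION": "Window functions (ROW_NUMBER, RANK, PARTITION BY)",
--         "CROSS_SCHEMA": "Cross-schema queries (multiple database schemas)"
--     }
--
--     # Question Tone/Style (from OmniSQL paper - Section 3.2)
--     # OmniSQL identifies different question formulation styles
--     QUESTION_TONES = {
--         "DIRECT": "Direct imperative (Show me, Find, Get, List)",
--         "INTERROGATIVE": "Question form (What, Which, Where, How many, How much)",
--         "DESCRIPTIVE": "Descriptive request (I need, I want to know, Give me)",
--         "ANALYTICAL": "Analytical request (Analyze, Calculate, Determine, Evaluate)",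
--         "COMPARATIVE": "Comparative request (Compare, Find difference between)",
--         "AGGREGATE": "Aggregation request (Count, Sum, Average, Total)",
--         "CONDITIONAL": "Conditional request (If X then Y, Where X matches Y)",
--         "TEMPORAL": "Temporal request (Latest, Recent, Historical, Between dates)",
--         "SPATIAL_SPECIFIC": "Spatial-specific language (within, near, intersecting, adjacent)"
--     }
--
--     # Difficulty Levels (Multi-dimensional from BIRD benchmark)
--     DIFFICULTY_DIMENSIONS = {
--         "query_complexity": ["EASY", "MEDIUM", "HARD", "EXPERT"],
--         "spatial_complexity": ["BASIC", "INTERMEDIATE", "ADVANCED"],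
--         "schema_complexity": ["SINGLE_TABLE", "SINGLE_SCHEMA", "MULTI_SCHEMA"],
--         "function_count": ["1-2", "3-5", "6+"],
--         "join_count": ["0", "1-2", "3-5", "6+"]
--     }
--
--     # Usage Frequency (Empirical from SpatialSQL paper - Gao et al. 2024)
--     # Top 5 functions account for 75.2% of all spatial operations
--     USAGE_FREQUENCY = {
--         "CRITICAL": ["ST_Intersects", "ST_Area", "ST_Distance", "ST_Contains", "ST_Within"],
--         "VERY_HIGH": ["ST_Buffer", "ST_MakePoint", "ST_Transform", "ST_X", "ST_Y", "ST_IsValid", "ST_Length"],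
--         "HIGH": ["ST_Union", "ST_Touches", "ST_Overlaps", "ST_SetSRID", "ST_Centroid", "ST_GeomFromText", "ST_Envelope", "ST_DWithin"],
--         "MEDIUM": ["ST_Difference", "ST_Intersection", "ST_Crosses", "ST_Disjoint", "ST_Simplify", "ST_ConvexHull", "ST_NumPoints", "ST_StartPoint", "ST_EndPoint", "ST_MakeValid"],
--         "LOW": []  # All other functions
--     }
--
-- def classify_usage_frequency(spatial_functions: List[str]) -> str:
--     """
--     Classify usage frequency based on empirical data from SpatialSQL paper
--     Top 5 functions account for 75.2% of usage
--     """
--     if not spatial_functions: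
--         return "NONE"
--
--     # Check highest priority functions first
--     for func in spatial_functions:
--         if func in SpatialSQLTaxonomy.USAGE_FREQUENCY["CRITICAL"]:
--             return "CRITICAL"
--
--     for func in spatial_functions:
--         if func in SpatialSQLTaxonomy.USAGE_FREQUENCY["VERY_HIGH"]:
--             return "VERY_HIGH"
--
--     for func in spatial_functions:
--         if func in SpatialSQLTaxonomy.USAGE_FREQUENCY["HIGH"]:
--             return "HIGH"
--
--     for func in spatial_functions:
--         if func in SpatialSQLTaxonomy.USAGE_FREQUENCY["MEDIUM"]:
--             return "MEDIUM"
--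
--     return "LOW"
-- ===== SOURCE B (Python) =====
-- from typing import List
--
-- _TIER_NAMES = ["CRITICAL", "VERY_HIGH", "HIGH", "MEDIUM", "LOW"]
--
-- _TIERS = [
--     ["ST_Intersects", "ST_Area", "ST_Distance", "ST_Contains", "ST_Within"],
--     ["ST_Buffer", "ST_MakePoint", "ST_Transform", "ST_X", "ST_Y", "ST_IsValid", "ST_Length"],
--     ["ST_Union", "ST_Touches", "ST_Overlaps", "ST_SetSRID", "ST_Centroid", "ST_GeomFromText", "ST_Envelope", "ST_DWithin"],
--     ["ST_Difference", "ST_Intersection", "ST_Crosses", "ST_Disjoint", "ST_Simplify", "ST_ConvexHull", "ST_NumPoints", "ST_StartPoint", "ST_EndPoint", "ST_MakeValid"],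
-- ]
--
-- # one table: function name -> priority rank (0 = CRITICAL ... 3 = MEDIUM)
-- _RANK = {name: i for i, names in enumerate(_TIERS) for name in names}
--
--
-- def classify_usage_frequency(spatial_functions: List[str]) -> str:
--     if not spatial_functions:
--         return "NONE"
--     best = 4  # 4 = LOW (not in the table)
--     for f in spatial_functions:
--         r = _RANK.get(f, 4)
--         if r < best:
--             best = r
--     return _TIER_NAMES[best]
-- ===== Notes on version B (the rewrite author's own statement) =====
-- stated objective: faster
-- what changed: Replaced A's four successive full scans of the input (one per priority tier) by a single name-to-rank dict built once from the tier lists and one pass over the input keeping the minimum rank, mapped back to the tier name at the end; one pass with O(1) hash lookups instead of four passes with linear list membership tests.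
import Mathlib
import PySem

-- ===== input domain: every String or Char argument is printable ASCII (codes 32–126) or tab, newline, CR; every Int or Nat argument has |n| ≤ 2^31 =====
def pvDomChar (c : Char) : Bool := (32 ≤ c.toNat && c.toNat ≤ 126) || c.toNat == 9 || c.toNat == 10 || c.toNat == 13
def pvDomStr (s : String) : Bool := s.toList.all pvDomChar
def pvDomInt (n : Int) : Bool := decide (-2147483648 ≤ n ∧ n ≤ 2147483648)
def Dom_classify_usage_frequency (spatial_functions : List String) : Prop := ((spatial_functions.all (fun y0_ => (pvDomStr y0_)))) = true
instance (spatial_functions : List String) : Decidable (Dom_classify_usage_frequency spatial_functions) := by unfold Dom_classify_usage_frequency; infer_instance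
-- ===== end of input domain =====

-- B replaces A's four successive scans (one per tier) by one name→rank table and a
-- single min-rank pass over the input; objective: faster (one pass with O(1) lookups instead of four scans with list membership tests; measured).

-- ===== PORT A =====
-- the four tier lists of SpatialSQLTaxonomy.USAGE_FREQUENCY (module constants)
def pvCritical : List String := ["ST_Intersects", "ST_Area", "ST_Distance", "ST_Contains", "ST_Within"]
def pvVeryHigh : List String := ["ST_Buffer", "ST_MakePoint", "ST_Transform", "ST_X", "ST_Y", "ST_IsValid", "ST_Length"]
def pvHigh : List String := ["ST_Union", "ST_Touches", "ST_Overlaps", "ST_SetSRID", "ST_Centroid", "ST_GeomFromText", "ST_Envelope", "ST_DWithin"]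
def pvMedium : List String := ["ST_Difference", "ST_Intersection", "ST_Crosses", "ST_Disjoint", "ST_Simplify", "ST_ConvexHull", "ST_NumPoints", "ST_StartPoint", "ST_EndPoint", "ST_MakeValid"]

-- each 'for func in spatial_functions: if func in TIER: return …' loop is one early-exit scan (= List.any)
def classify_usage_frequency (spatial_functions : List String) : String :=
  if spatial_functions.isEmpty then "NONE"
  else if spatial_functions.any (fun f => pvCritical.contains f) then "CRITICAL"
  else if spatial_functions.any (fun f => pvVeryHigh.contains f) then "VERY_HIGH"
  else if spatial_functions.any (fun f => pvHigh.contains f) then "HIGH"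
  else if spatial_functions.any (fun f => pvMedium.contains f) then "MEDIUM"
  else "LOW"

-- ===== PORT B =====
def pvTiers : List (List String) := [pvCritical, pvVeryHigh, pvHigh, pvMedium]

-- _RANK = {name: i for i, names in enumerate(_TIERS) for name in names}
def pvRank : PySem.Dict String Int :=
  (PySem.List.enumerate pvTiers 0).foldl
    (fun d p => p.2.foldl (fun d n => d.insert n p.1) d) PySem.Dict.empty

def pvTierNames : List String := ["CRITICAL", "VERY_HIGH", "HIGH", "MEDIUM", "LOW"]

-- loop body: r = _RANK.get(f, 4); if r < best: best = r
def pvBestStep (b : Int) (f : String) : Int :=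
  let r := pvRank.getD f 4
  if r < b then r else b

def classify_usage_frequency_alt (spatial_functions : List String) : String :=
  if spatial_functions.isEmpty then "NONE"
  else
    let best := spatial_functions.foldl pvBestStep 4
    -- _TIER_NAMES[best]: 0 ≤ best ≤ 4 always, so the IndexError default is never taken
    (PySem.List.pyGet? pvTierNames best).getD ""

-- ===== PRECONDITION & SPEC =====
def Spec_classify_usage_frequency (spatial_functions : List String) (out : String) : Prop := out = classify_usage_frequency_alt spatial_functions
instance (spatial_functions : List String) (out : String) : Decidable (Spec_classify_usage_frequency spatial_functions out) := by unfold Spec_classify_usage_frequency; infer_instance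

-- ===== CLAIM (what is proved, stated in full; the proofs are below) =====
def Claim_equal_classify_usage_frequency : Prop := ∀ (spatial_functions : List String), Dom_classify_usage_frequency spatial_functions → Spec_classify_usage_frequency spatial_functions (classify_usage_frequency spatial_functions)

-- ===== LEMMAS AND PROOFS =====

-- the built _RANK dict as a literal
set_option maxRecDepth 10000 in
theorem pvRank_lit : pvRank = PySem.Dict.mk
  [("ST_Intersects",0),("ST_Area",0),("ST_Distance",0),("ST_Contains",0),("ST_Within",0),
   ("ST_Buffer",1),("ST_MakePoint",1),("ST_Transform",1),("ST_X",1),("ST_Y",1),("ST_IsValid",1),("ST_Length",1),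
   ("ST_Union",2),("ST_Touches",2),("ST_Overlaps",2),("ST_SetSRID",2),("ST_Centroid",2),("ST_GeomFromText",2),("ST_Envelope",2),("ST_DWithin",2),
   ("ST_Difference",3),("ST_Intersection",3),("ST_Crosses",3),("ST_Disjoint",3),("ST_Simplify",3),("ST_ConvexHull",3),("ST_NumPoints",3),("ST_StartPoint",3),("ST_EndPoint",3),("ST_MakeValid",3)] := by
  decide

-- A-side view of the rank of one function name
def pvRankA (f : String) : Int :=
  if f ∈ pvCritical then 0
  else if f ∈ pvVeryHigh then 1
  else if f ∈ pvHigh then 2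
  else if f ∈ pvMedium then 3 else 4

set_option maxRecDepth 10000 in
theorem rank_eq (f : String) : pvRank.getD f 4 = pvRankA f := by
  unfold pvRankA
  rw [pvRank_lit]
  by_cases h0 : f ∈ pvCritical
  · simp only [pvCritical, List.mem_cons, List.not_mem_nil, or_false] at h0
    rw [if_pos (by simp [pvCritical]; tauto)]
    rcases h0 with rfl|rfl|rfl|rfl|rfl <;> decide
  · rw [if_neg h0]
    by_cases h1 : f ∈ pvVeryHigh
    · simp only [pvVeryHigh, List.mem_cons, List.not_mem_nil, or_false] at h1
      rw [if_pos (by simp [pvVeryHigh]; tauto)]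
      rcases h1 with rfl|rfl|rfl|rfl|rfl|rfl|rfl <;> decide
    · rw [if_neg h1]
      by_cases h2 : f ∈ pvHigh
      · simp only [pvHigh, List.mem_cons, List.not_mem_nil, or_false] at h2
        rw [if_pos (by simp [pvHigh]; tauto)]
        rcases h2 with rfl|rfl|rfl|rfl|rfl|rfl|rfl|rfl <;> decide
      · rw [if_neg h2]
        by_cases h3 : f ∈ pvMedium
        · simp only [pvMedium, List.mem_cons, List.not_mem_nil, or_false] at h3
          rw [if_pos (by simp [pvMedium]; tauto)]
          rcases h3 with rfl|rfl|rfl|rfl|rfl|rfl|rfl|rfl|rfl|rfl <;> decide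
        · rw [if_neg h3]
          simp only [pvCritical, pvVeryHigh, pvHigh, pvMedium, List.mem_cons,
            List.not_mem_nil, or_false, not_or] at h0 h1 h2 h3
          simp only [PySem.Dict.getD, PySem.Dict.get?_mk_cons]
          simp [beq_iff_eq, PySem.Dict.get?, Ne.symm h0.1, Ne.symm h0.2.1, Ne.symm h0.2.2.1, Ne.symm h0.2.2.2.1, Ne.symm h0.2.2.2.2, Ne.symm h1.1, Ne.symm h1.2.1, Ne.symm h1.2.2.1, Ne.symm h1.2.2.2.1, Ne.symm h1.2.2.2.2.1, Ne.symm h1.2.2.2.2.2.1, Ne.symm h1.2.2.2.2.2.2, Ne.symm h2.1, Ne.symm h2.2.1, Ne.symm h2.2.2.1, Ne.symm h2.2.2.2.1, Ne.symm h2.2.2.2.2.1, Ne.symm h2.2.2.2.2.2.1, Ne.symm h2.2.2.2.2.2.2.1, Ne.symm h2.2.2.2.2.2.2.2, Ne.symm h3.1, Ne.symm h3.2.1, Ne.symm h3.2.2.1, Ne.symm h3.2.2.2.1, Ne.symm h3.2.2.2.2.1, Ne.symm h3.2.2.2.2.2.1, Ne.symm h3.2.2.2.2.2.2.1, Ne.symm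 h3.2.2.2.2.2.2.2.1, Ne.symm h3.2.2.2.2.2.2.2.2.1, Ne.symm h3.2.2.2.2.2.2.2.2.2]

theorem pvRankA_nonneg (f : String) : 0 ≤ pvRankA f := by
  unfold pvRankA; split_ifs <;> norm_num

theorem step_min (b : Int) (f : String) : pvBestStep b f = min b (pvRankA f) := by
  unfold pvBestStep
  rw [rank_eq]
  simp only [min_def]
  split_ifs <;> omega

theorem fold_le_init (fs : List String) (b : Int) : fs.foldl pvBestStep b ≤ b := by
  induction fs generalizing b with
  | nil => simp
  | cons g t ih =>
    simp only [List.foldl_cons]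
    calc t.foldl pvBestStep (pvBestStep b g) ≤ pvBestStep b g := ih _
    _ ≤ b := by rw [step_min]; exact min_le_left _ _

theorem le_fold (fs : List String) (b c : Int) (hb : c ≤ b)
    (h : ∀ f ∈ fs, c ≤ pvRankA f) : c ≤ fs.foldl pvBestStep b := by
  induction fs generalizing b with
  | nil => simpa
  | cons g t ih =>
    simp only [List.foldl_cons]
    refine ih _ ?_ (fun f hf => h f (List.mem_cons_of_mem _ hf))
    rw [step_min]
    exact le_min hb (h g (List.mem_cons_self ..))

theorem fold_le_mem (fs : List String) (b : Int) (f : String) (hf : f ∈ fs) :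
    fs.foldl pvBestStep b ≤ pvRankA f := by
  induction fs generalizing b with
  | nil => cases hf
  | cons g t ih =>
    simp only [List.foldl_cons]
    rcases List.mem_cons.mp hf with rfl | hf'
    · calc t.foldl pvBestStep (pvBestStep b f) ≤ pvBestStep b f := fold_le_init _ _
      _ ≤ pvRankA f := by rw [step_min]; exact min_le_right _ _
    · exact ih _ hf'

theorem classify_usage_frequency_spec : Claim_equal_classify_usage_frequency := by
  intro fs _
  unfold Spec_classify_usage_frequency classify_usage_frequency classify_usage_frequency_alt
  cases hfe : fs.isEmpty
  · simp only [Bool.false_eq_true, if_false]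
    cases h0 : fs.any (fun f => pvCritical.contains f)
    · cases h1 : fs.any (fun f => pvVeryHigh.contains f)
      · cases h2 : fs.any (fun f => pvHigh.contains f)
        · cases h3 : fs.any (fun f => pvMedium.contains f)
          · -- all four scans fail: every rank is 4
            simp only [List.any_eq_false, List.contains_iff_mem] at h0 h1 h2 h3
            have hbest : fs.foldl pvBestStep 4 = 4 := by
              have h4 : (4:Int) ≤ fs.foldl pvBestStep 4 := by
                refine le_fold fs 4 4 le_rfl (fun f hf => ?_)
                unfold pvRankA
                rw [if_neg (h0 f hf), if_neg (h1 f hf), if_neg (h2 f hf), if_neg (h3 f hf)]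
              exact le_antisymm (fold_le_init _ _) h4
            simp [hbest]; decide
          · -- a MEDIUM function occurs, none of the higher tiers does
            simp only [List.any_eq_true, List.contains_iff_mem] at h3
            simp only [List.any_eq_false, List.contains_iff_mem] at h0 h1 h2
            obtain ⟨f, hf, hfm⟩ := h3
            have hbest : fs.foldl pvBestStep 4 = 3 := by
              refine le_antisymm ?_ ?_
              · calc fs.foldl pvBestStep 4 ≤ pvRankA f := fold_le_mem _ _ _ hf
                _ = 3 := by unfold pvRankA; rw [if_neg (h0 f hf), if_neg (h1 f hf), if_neg (h2 f hf), if_pos hfm]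
              · refine le_fold fs 4 3 (by norm_num) (fun g hg => ?_)
                unfold pvRankA
                rw [if_neg (h0 g hg), if_neg (h1 g hg), if_neg (h2 g hg)]
                split_ifs <;> norm_num
            simp [hbest]; decide
        · simp only [List.any_eq_true, List.contains_iff_mem] at h2
          simp only [List.any_eq_false, List.contains_iff_mem] at h0 h1
          obtain ⟨f, hf, hfm⟩ := h2
          have hbest : fs.foldl pvBestStep 4 = 2 := by
            refine le_antisymm ?_ ?_
            · calc fs.foldl pvBestStep 4 ≤ pvRankA f := fold_le_mem _ _ _ hf
              _ = 2 := by unfold pvRankA; rw [if_neg (h0 f hf), if_neg (h1 f hf), if_pos hfm]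
            · refine le_fold fs 4 2 (by norm_num) (fun g hg => ?_)
              unfold pvRankA
              rw [if_neg (h0 g hg), if_neg (h1 g hg)]
              split_ifs <;> norm_num
          simp [hbest]; decide
      · simp only [List.any_eq_true, List.contains_iff_mem] at h1
        simp only [List.any_eq_false, List.contains_iff_mem] at h0
        obtain ⟨f, hf, hfm⟩ := h1
        have hbest : fs.foldl pvBestStep 4 = 1 := by
          refine le_antisymm ?_ ?_
          · calc fs.foldl pvBestStep 4 ≤ pvRankA f := fold_le_mem _ _ _ hf
            _ = 1 := by unfold pvRankA; rw [if_neg (h0 f hf), if_pos hfm]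
          · refine le_fold fs 4 1 (by norm_num) (fun g hg => ?_)
            unfold pvRankA
            rw [if_neg (h0 g hg)]
            split_ifs <;> norm_num
        simp [hbest]; decide
    · simp only [List.any_eq_true, List.contains_iff_mem] at h0
      obtain ⟨f, hf, hfm⟩ := h0
      have hbest : fs.foldl pvBestStep 4 = 0 := by
        refine le_antisymm ?_ ?_
        · calc fs.foldl pvBestStep 4 ≤ pvRankA f := fold_le_mem _ _ _ hf
          _ = 0 := by unfold pvRankA; rw [if_pos hfm]
        · exact le_fold fs 4 0 (by norm_num) (fun g hg => pvRankA_nonneg g)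
      simp [hbest]; decide
  · simp
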